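-- pv_equiv track=rewrite | github.com/alexc17/locallearner | locallearner/ngram_counts.py | count_bigrams
-- ===== SOURCE A (Python) =====
-- from collections import Counter
--
-- BOUNDARY = '<s>'
--
-- def count_bigrams(sentences):
--     """Count all bigrams in a corpus, including sentence boundaries.
--
--     Each sentence is padded with <s> on both sides:
--       <s> w1 w2 ... wn <s>
--     producing bigrams: (<s>,w1), (w1,w2), ..., (wn,<s>).
--
--     Args:
--         sentences: iterable of tuples/lists of word strings.
--
--     Returns:
--         Counter mapping (word1, word2) -> count.
--     """
--     counts = Counter()
--     for s in sentences:
--         prev = BOUNDARY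
--         for w in s:
--             counts[(prev, w)] += 1
--             prev = w
--         counts[(prev, BOUNDARY)] += 1
--     return counts
-- ===== SOURCE B (Python) =====
-- from collections import Counter
--
-- BOUNDARY = '<s>'
--
-- def count_bigrams(sentences):
--     """Flatten the corpus into one boundary-separated token stream, then
--     count adjacent pairs in a single sweep."""
--     tokens = [BOUNDARY]
--     for s in sentences:
--         tokens.extend(s)
--         tokens.append(BOUNDARY)
--     return Counter(zip(tokens, tokens[1:]))
-- ===== Notes on version B (the rewrite author's own statement) =====
-- stated objective: idiomatic
-- what changed: B replaces the nested per-sentence loop with its prev register and separate end-of-sentence increment by a build-then-sweep: flatten the corpus into one boundary-separated token stream and count adjacent pairs with Counter(zip(tokens, tokens[1:])).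
import Mathlib
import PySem

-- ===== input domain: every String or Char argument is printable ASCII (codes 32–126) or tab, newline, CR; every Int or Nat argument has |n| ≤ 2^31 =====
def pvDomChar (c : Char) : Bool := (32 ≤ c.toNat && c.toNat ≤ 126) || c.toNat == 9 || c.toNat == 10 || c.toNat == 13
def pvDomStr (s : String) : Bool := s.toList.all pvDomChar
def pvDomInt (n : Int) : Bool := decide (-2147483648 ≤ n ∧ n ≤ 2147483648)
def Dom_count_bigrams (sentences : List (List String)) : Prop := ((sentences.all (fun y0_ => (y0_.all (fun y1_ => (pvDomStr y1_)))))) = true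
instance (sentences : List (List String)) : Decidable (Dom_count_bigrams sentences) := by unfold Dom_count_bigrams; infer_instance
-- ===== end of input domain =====

-- B flattens the corpus into one boundary-separated token stream and counts adjacent
-- pairs in a single sweep, replacing A's nested loop with prev register (idiomatic).


def pvBOUNDARY : String := "<s>"

-- ===== PORT A =====
-- 'counts[(prev, w)] += 1' on a Counter is Dict.modify key 0 (· + 1)
def count_bigrams (sentences : List (List String)) : List (String × String × Int) :=
  let counts :=
    sentences.foldl (fun counts s =>
      let st := s.foldl
        (fun (st : PySem.Dict (String × String) Int × String) w =>
          (st.1.modify (st.2, w) 0 (· + 1), w))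
        (counts, pvBOUNDARY)
      st.1.modify (st.2, pvBOUNDARY) 0 (· + 1))
      PySem.Dict.empty
  counts.items.map (fun p => (p.1.1, p.1.2, p.2))

-- ===== PORT B =====
-- tokens built by extend/append; Counter(zip(tokens, tokens[1:])) is Dict.counter
def count_bigrams_alt (sentences : List (List String)) : List (String × String × Int) :=
  let tokens := sentences.foldl (fun acc s => acc ++ s ++ [pvBOUNDARY]) [pvBOUNDARY]
  (PySem.Dict.counter (tokens.zip (tokens.drop 1))).items.map (fun p => (p.1.1, p.1.2, p.2))

-- ===== PRECONDITION & SPEC =====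
def Spec_count_bigrams (sentences : List (List String)) (out : List (String × String × Int)) : Prop := out = count_bigrams_alt sentences
instance (sentences : List (List String)) (out : List (String × String × Int)) : Decidable (Spec_count_bigrams sentences out) := by unfold Spec_count_bigrams; infer_instance

-- ===== CLAIM (what is proved, stated in full; the proofs are below) =====
def Claim_equal_count_bigrams : Prop := ∀ (sentences : List (List String)), Dom_count_bigrams sentences → Spec_count_bigrams sentences (count_bigrams sentences)

-- ===== LEMMAS AND PROOFS =====

-- adjacent pairs of a list
def pvAdj (l : List String) : List (String × String) := l.zip (l.drop 1)

-- the counter-bump step shared by both counting folds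
def pvBump (d : PySem.Dict (String × String) Int) (p : String × String) : PySem.Dict (String × String) Int :=
  d.modify p 0 (· + 1)

theorem pvAdj_cons_cons (a b : String) (l : List String) :
    pvAdj (a :: b :: l) = (a, b) :: pvAdj (b :: l) := rfl

-- splitting adjacent pairs at an interior element
theorem pvAdj_split (u : List String) (v : String) (ys : List String) :
    pvAdj (u ++ v :: ys) = pvAdj (u ++ [v]) ++ pvAdj (v :: ys) := by
  induction u with
  | nil => simp [pvAdj]
  | cons a u ih =>
    cases u with
    | nil => simp [pvAdj]
    | cons b u' =>
      simp only [List.cons_append, pvAdj_cons_cons] at *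
      simp [ih]

-- A's per-sentence work equals a bump-fold over the sentence's padded adjacent pairs
theorem pvInner (s : List String) (c : PySem.Dict (String × String) Int) (prev : String) :
    (let st := s.foldl
        (fun (st : PySem.Dict (String × String) Int × String) w =>
          (st.1.modify (st.2, w) 0 (· + 1), w)) (c, prev)
     st.1.modify (st.2, pvBOUNDARY) 0 (· + 1))
    = (pvAdj (prev :: s ++ [pvBOUNDARY])).foldl pvBump c := by
  induction s generalizing c prev with
  | nil => simp [pvAdj, pvBump]
  | cons w ws ih =>
    simp only [List.foldl_cons, List.cons_append, pvAdj_cons_cons, List.foldl_cons]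
    exact ih (c.modify (prev, w) 0 (· + 1)) w

-- A's whole counting loop equals a bump-fold over the per-sentence pair streams
theorem pvAEq (sentences : List (List String)) (c : PySem.Dict (String × String) Int) :
    sentences.foldl (fun counts s =>
      let st := s.foldl
        (fun (st : PySem.Dict (String × String) Int × String) w =>
          (st.1.modify (st.2, w) 0 (· + 1), w)) (counts, pvBOUNDARY)
      st.1.modify (st.2, pvBOUNDARY) 0 (· + 1)) c
    = (sentences.flatMap (fun s => pvAdj (pvBOUNDARY :: s ++ [pvBOUNDARY]))).foldl pvBump c := by
  induction sentences generalizing c with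
  | nil => rfl
  | cons s rest ih =>
    simp only [List.foldl_cons, List.flatMap_cons, List.foldl_append]
    rw [← pvInner s c pvBOUNDARY]
    exact ih _

-- B's token accumulation is a flatten
theorem pvTokens (sentences : List (List String)) (acc : List String) :
    sentences.foldl (fun acc s => acc ++ s ++ [pvBOUNDARY]) acc
    = acc ++ sentences.flatMap (fun s => s ++ [pvBOUNDARY]) := by
  induction sentences generalizing acc with
  | nil => simp
  | cons s rest ih => simp [List.flatMap]

-- adjacent pairs of the flattened stream split into the per-sentence pair streams
theorem pvAdjFlat (sentences : List (List String)) :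
    pvAdj (pvBOUNDARY :: sentences.flatMap (fun s => s ++ [pvBOUNDARY]))
    = sentences.flatMap (fun s => pvAdj (pvBOUNDARY :: s ++ [pvBOUNDARY])) := by
  induction sentences with
  | nil => rfl
  | cons s rest ih =>
    have h := pvAdj_split (pvBOUNDARY :: s) pvBOUNDARY (rest.flatMap (fun s => s ++ [pvBOUNDARY]))
    simp only [List.flatMap_cons, List.cons_append, List.append_assoc, List.nil_append] at *
    rw [h, ih]

-- ===== VERDICT (by name: the statement is the Claim_ definition above) =====
theorem count_bigrams_spec : Claim_equal_count_bigrams := by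
  intro sentences _
  show _ = _
  unfold count_bigrams count_bigrams_alt
  simp only [pvAEq, pvTokens, List.singleton_append]
  rw [PySem.Dict.counter_eq_foldl]
  have : (pvBOUNDARY :: sentences.flatMap (fun s => s ++ [pvBOUNDARY])).zip
      ((pvBOUNDARY :: sentences.flatMap (fun s => s ++ [pvBOUNDARY])).drop 1)
      = pvAdj (pvBOUNDARY :: sentences.flatMap (fun s => s ++ [pvBOUNDARY])) := rfl
  rw [this, pvAdjFlat]
  rfl
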